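-- pv_equiv track=rewrite | github.com/ZRmn/kioki | encryption.py | __get_key_indexes
-- ===== SOURCE A (Python) =====
-- def __get_key_indexes(key):
--     key_as_numbers = [ord(char) for char in key]
--     indexes = [-1] * len(key_as_numbers)
--
--     max_number = max(key_as_numbers) + 1
--
--     for i in range(len(indexes)):
--         index = key_as_numbers.index(min(key_as_numbers))
--         key_as_numbers[index] = max_number
--         indexes[index] = i
--
--     return indexes
-- ===== SOURCE B (Python) =====
-- def __get_key_indexes(key):
--     order = sorted(range(len(key)), key=lambda i: ord(key[i]))
--     indexes = [-1] * len(key)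
--     for rank, pos in enumerate(order):
--         indexes[pos] = rank
--     return indexes
-- ===== Notes on version B (the rewrite author's own statement) =====
-- stated objective: faster
-- what changed: Replaces the destructive selection loop (repeated min + first-index lookup + overwrite with a sentinel) by a single stable argsort of the positions followed by one scatter pass assigning ranks.
import Mathlib
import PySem

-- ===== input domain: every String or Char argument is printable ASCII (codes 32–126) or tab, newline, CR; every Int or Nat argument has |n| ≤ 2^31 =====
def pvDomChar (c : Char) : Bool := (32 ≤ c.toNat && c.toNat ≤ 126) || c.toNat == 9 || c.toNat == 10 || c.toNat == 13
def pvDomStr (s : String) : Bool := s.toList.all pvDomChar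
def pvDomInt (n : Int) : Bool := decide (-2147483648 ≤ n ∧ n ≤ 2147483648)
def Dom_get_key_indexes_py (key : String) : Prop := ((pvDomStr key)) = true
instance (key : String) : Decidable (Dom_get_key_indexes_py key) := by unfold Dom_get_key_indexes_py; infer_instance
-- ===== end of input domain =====

-- B replaces A's quadratic destructive selection loop (repeated min + first-index + sentinel overwrite)
-- by one stable argsort of the positions and a single scatter pass assigning ranks (objective: faster).

-- ===== PORT A =====
-- the loop body of A: index = key_as_numbers.index(min(key_as_numbers)); key_as_numbers[index] = max_number; indexes[index] = i
def pvStepA (max_number : Int) (st : List Int × List Int) (i : Int) : List Int × List Int :=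
  let index := ((PySem.List.min? st.1 (fun x => x)).bind (fun mn => PySem.List.index? st.1 mn)).getD 0
  (st.1.set index max_number, st.2.set index i)

def get_key_indexes_py (key : String) : List Int :=
  let key_as_numbers := key.toList.map (fun c => (c.toNat : Int))
  let indexes := List.replicate key_as_numbers.length (-1 : Int)
  match PySem.List.max? key_as_numbers (fun x => x) with
  | none => []   -- Python raises ValueError here (max of empty sequence); excluded by Pre_
  | some mx =>
    ((PySem.List.pyRange 0 (indexes.length : Int) 1).foldl (pvStepA (mx + 1))
      (key_as_numbers, indexes)).2

-- ===== PORT B =====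
def get_key_indexes_py_alt (key : String) : List Int :=
  let cs := key.toList.map (fun c => (c.toNat : Int))
  let order := PySem.List.sorted (PySem.List.pyRange 0 (cs.length : Int) 1)
                 (fun i => PySem.List.pyGetD cs i 0) false
  (PySem.List.enumerate order 0).foldl
    (fun idxs rp => PySem.List.pySetD idxs rp.2 rp.1)
    (List.replicate cs.length (-1 : Int))

-- ===== PRECONDITION & SPEC =====
-- Pre_ excludes only the empty key, on which Python's max([]) raises ValueError.
def Pre_get_key_indexes_py (key : String) : Prop := key ≠ ""
instance (key : String) : Decidable (Pre_get_key_indexes_py key) := by unfold Pre_get_key_indexes_py; infer_instance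
def pvWitness_get_key_indexes_py : String := "banana"

def Spec_get_key_indexes_py (key : String) (out : List Int) : Prop := out = get_key_indexes_py_alt key
instance (key : String) (out : List Int) : Decidable (Spec_get_key_indexes_py key out) := by unfold Spec_get_key_indexes_py; infer_instance

-- ===== CLAIM (what is proved, stated in full; the proofs are below) =====
def Claim_equal_get_key_indexes_py : Prop := ∀ (key : String), Dom_get_key_indexes_py key → Pre_get_key_indexes_py key → Spec_get_key_indexes_py key (get_key_indexes_py key)

-- ===== LEMMAS AND PROOFS =====

-- the value at (Int) position i of the ord-list cs
def pvVal (cs : List Int) (i : Int) : Int := PySem.List.pyGetD cs i 0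

-- strict lexicographic order on positions by (value, position): the order B sorts by (stably)
def pvLex (cs : List Int) (a b : Int) : Prop :=
  pvVal cs a < pvVal cs b ∨ (pvVal cs a = pvVal cs b ∧ a < b)

-- B's argsort list
def pvOrd (cs : List Int) : List Int :=
  PySem.List.sorted (PySem.List.pyRange 0 (cs.length : Int) 1)
    (fun i => PySem.List.pyGetD cs i 0) false

-- cs with the positions listed in ps overwritten by M (A's sentinel marking)
def pvMark (cs : List Int) (M : Int) (ps : List Int) : List Int :=
  ps.foldl (fun l p => l.set p.toNat M) cs

-- the scatter pass of B, as a function of the processed prefix of the order list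
def pvScat (n : Nat) (ps : List Int) : List Int :=
  (PySem.List.enumerate ps 0).foldl
    (fun idxs rp => PySem.List.pySetD idxs rp.2 rp.1)
    (List.replicate n (-1 : Int))

-- ---- stability of the sort ----
lemma pvInsertBy_lex (key : Int → Int) (x : Int) (acc : List Int)
    (hacc : acc.Pairwise (fun a b => key a < key b ∨ (key a = key b ∧ a < b)))
    (hx : ∀ a ∈ acc, a < x) :
    (PySem.List.insertBy (fun a b => decide (key a < key b)) x acc).Pairwise
      (fun a b => key a < key b ∨ (key a = key b ∧ a < b)) := by
  induction acc with
  | nil => simp [PySem.List.insertBy]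
  | cons y ys ih =>
    rw [List.pairwise_cons] at hacc
    obtain ⟨hy, hys⟩ := hacc
    by_cases h : key x < key y
    · rw [show PySem.List.insertBy (fun a b => decide (key a < key b)) x (y :: ys)
          = x :: y :: ys from by simp [PySem.List.insertBy, h]]
      refine List.Pairwise.cons ?_ (List.Pairwise.cons hy hys)
      intro z hz
      rcases List.mem_cons.mp hz with rfl | hz
      · exact Or.inl h
      · rcases hy z hz with h' | ⟨h', _⟩
        · exact Or.inl (lt_trans h h')
        · exact Or.inl (h' ▸ h)
    · rw [show PySem.List.insertBy (fun a b => decide (key a < key b)) x (y :: ys)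
          = y :: PySem.List.insertBy (fun a b => decide (key a < key b)) x ys from by
            simp [PySem.List.insertBy, h]]
      refine List.Pairwise.cons ?_ (ih hys (fun a ha => hx a (by simp [ha])))
      intro z hz
      rw [PySem.List.insertBy_mem_iff] at hz
      rcases hz with rfl | hz
      · rcases lt_or_eq_of_le (le_of_not_gt h) with h' | h'
        · exact Or.inl h'
        · exact Or.inr ⟨h'.symm ▸ rfl, hx y (by simp)⟩
      · exact hy z hz

lemma pvFoldl_insertBy_lex (key : Int → Int) :
    ∀ (xs acc : List Int),
      acc.Pairwise (fun a b => key a < key b ∨ (key a = key b ∧ a < b)) →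
      (∀ a ∈ acc, ∀ r ∈ xs, a < r) → xs.Pairwise (· < ·) →
      (xs.foldl (fun acc x => PySem.List.insertBy (fun a b => decide (key a < key b)) x acc) acc).Pairwise
        (fun a b => key a < key b ∨ (key a = key b ∧ a < b)) := by
  intro xs
  induction xs with
  | nil => intro acc hacc _ _; exact hacc
  | cons x xs ih =>
    intro acc hacc hcross hxs
    rw [List.pairwise_cons] at hxs
    obtain ⟨hxlt, hxs⟩ := hxs
    refine ih _ (pvInsertBy_lex key x acc hacc (fun a ha => hcross a ha x (by simp))) ?_ hxs
    intro a ha r hr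
    rw [PySem.List.insertBy_mem_iff] at ha
    rcases ha with rfl | ha
    · exact hxlt r hr
    · exact hcross a ha r (by simp [hr])

lemma pvOrd_pairwise (cs : List Int) : (pvOrd cs).Pairwise (pvLex cs) := by
  have h := pvFoldl_insertBy_lex (fun i => PySem.List.pyGetD cs i 0)
    (PySem.List.pyRange 0 (cs.length : Int) 1) [] (by simp) (by simp)
    (PySem.List.pairwise_lt_pyRange_one _ _)
  rw [pvOrd, PySem.List.sorted_eq_foldl_insertBy]
  exact h.imp (fun hab => hab)

lemma pvOrd_perm (cs : List Int) :
    (pvOrd cs).Perm (PySem.List.pyRange 0 (cs.length : Int) 1) :=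
  PySem.List.sorted_perm _ _ _

lemma pvOrd_length (cs : List Int) : (pvOrd cs).length = cs.length := by
  have := (pvOrd_perm cs).length_eq
  simp [PySem.List.length_pyRange_one] at this
  omega

lemma pvOrd_nodup (cs : List Int) : (pvOrd cs).Nodup :=
  ((pvOrd_perm cs).nodup_iff).mpr (PySem.List.nodup_pyRange_one _ _)

lemma pvOrd_mem (cs : List Int) (q : Int) :
    q ∈ pvOrd cs ↔ 0 ≤ q ∧ q < (cs.length : Int) := by
  rw [(pvOrd_perm cs).mem_iff, PySem.List.mem_pyRange_one]

lemma pvOrd_getElem_lex (cs : List Int) {j l : Nat} (hjl : j < l) (hl : l < (pvOrd cs).length) :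
    pvLex cs (pvOrd cs)[j] (pvOrd cs)[l] :=
  (List.pairwise_iff_getElem.mp (pvOrd_pairwise cs)) j l (lt_trans hjl hl) hl hjl

lemma pvOrd_getElem_range (cs : List Int) {j : Nat} (hj : j < (pvOrd cs).length) :
    0 ≤ (pvOrd cs)[j] ∧ (pvOrd cs)[j] < (cs.length : Int) :=
  (pvOrd_mem cs _).mp (List.getElem_mem hj)

-- membership in a take-prefix of the nodup order list
lemma pvMem_take_iff (cs : List Int) (k : Nat) (q : Int) :
    q ∈ (pvOrd cs).take k ↔ ∃ j : Nat, ∃ hj : j < (pvOrd cs).length, j < k ∧ (pvOrd cs)[j] = q := by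
  constructor
  · intro hmem
    obtain ⟨j, hj, he⟩ := List.getElem_of_mem hmem
    have hj' : j < k ∧ j < (pvOrd cs).length := by simpa using hj
    exact ⟨j, hj'.2, hj'.1, by rw [← List.getElem_take (h := hj)]; exact he⟩
  · rintro ⟨j, hj, hjk, rfl⟩
    have hlen : j < ((pvOrd cs).take k).length := by simp; omega
    have := List.getElem_mem hlen
    rwa [List.getElem_take] at this

-- ---- the mark list, pointwise ----
lemma pvMark_length (cs : List Int) (M : Int) (ps : List Int) :
    (pvMark cs M ps).length = cs.length := by
  induction ps generalizing cs with
  | nil => rfl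
  | cons p ps ih => simp only [pvMark] at ih ⊢; rw [List.foldl_cons, ih]; simp

lemma pvMark_getElem? (M : Int) :
    ∀ (ps cs : List Int), (∀ p ∈ ps, 0 ≤ p ∧ p < (cs.length : Int)) →
      ∀ q : Nat, q < cs.length →
      (pvMark cs M ps)[q]? = if ((q : Int) ∈ ps) then some M else cs[q]? := by
  intro ps
  induction ps with
  | nil => intro cs _ q hq; simp [pvMark]
  | cons p ps ih =>
    intro cs hps q hq
    have hp := hps p (by simp)
    have h1 : pvMark cs M (p :: ps) = pvMark (cs.set p.toNat M) M ps := rfl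
    have hps' : ∀ r ∈ ps, 0 ≤ r ∧ r < ((cs.set p.toNat M).length : Int) := by
      intro r hr; simpa using hps r (by simp [hr])
    rw [h1, ih (cs.set p.toNat M) hps' q (by simpa using hq)]
    by_cases hmem : (q : Int) ∈ ps
    · rw [if_pos hmem, if_pos (by simp [hmem])]
    · rw [if_neg hmem]
      by_cases heq : (q : Int) = p
      · have hqp : q = p.toNat := by omega
        rw [if_pos (by simp [heq]), hqp, List.getElem?_set_self (by omega)]
      · have hne : p.toNat ≠ q := by omega
        rw [if_neg (by simp [heq, hmem]), List.getElem?_set_ne hne]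

-- ---- enumerate / scatter step ----
lemma pvEnumerate_append_singleton {α : Type} (xs : List α) (x : α) (s : Int) :
    PySem.List.enumerate (xs ++ [x]) s = PySem.List.enumerate xs s ++ [(s + xs.length, x)] := by
  induction xs generalizing s with
  | nil => simp [PySem.List.enumerate_cons, PySem.List.enumerate_nil]
  | cons y ys ih => simp [PySem.List.enumerate_cons, ih]; ring_nf

-- an unmarked in-range position sits in the order list at a position ≥ k
lemma pvUnmarked (cs : List Int) (k : Nat) (q : Nat) (hq : q < cs.length)
    (hnm : ((q : Int) ∉ (pvOrd cs).take k)) :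
    ∃ j, ∃ hj : j < (pvOrd cs).length, k ≤ j ∧ (pvOrd cs)[j] = (q : Int) := by
  have hmem : (q : Int) ∈ pvOrd cs :=
    (pvOrd_mem cs _).mpr ⟨by positivity, by exact_mod_cast hq⟩
  obtain ⟨j, hj, he⟩ := List.getElem_of_mem hmem
  refine ⟨j, hj, ?_, he⟩
  by_contra hlt
  exact hnm ((pvMem_take_iff cs k _).mpr ⟨j, hj, by omega, he⟩)

-- ---- the selection step of A picks exactly the k-th element of B's order ----
lemma pvMin_eq (cs : List Int) (M : Int) (hM : ∀ x ∈ cs, x < M) (k : Nat)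
    (hk : k < cs.length) :
    PySem.List.min? (pvMark cs M ((pvOrd cs).take k)) (fun x => x)
      = some (pvVal cs ((pvOrd cs)[k]'(by rw [pvOrd_length]; exact hk))) := by
  have hkord : k < (pvOrd cs).length := by rw [pvOrd_length]; exact hk
  obtain ⟨hp0, hpn⟩ := pvOrd_getElem_range cs hkord
  have hpnat : ((pvOrd cs)[k]'hkord).toNat < cs.length := by omega
  have hpcast : (((pvOrd cs)[k]'hkord).toNat : Int) = (pvOrd cs)[k]'hkord := by omega
  have hv : pvVal cs ((pvOrd cs)[k]'hkord) = cs[((pvOrd cs)[k]'hkord).toNat] :=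
    PySem.List.pyGetD_eq_getElem cs 0 hp0 hpn
  have hbound : ∀ r ∈ (pvOrd cs).take k, 0 ≤ r ∧ r < (cs.length : Int) :=
    fun r hr => (pvOrd_mem cs r).mp (List.mem_of_mem_take hr)
  have hmkq := fun (q : Nat) (hq : q < cs.length) =>
    pvMark_getElem? M ((pvOrd cs).take k) cs hbound q hq
  have hpnm : ((pvOrd cs)[k]'hkord) ∉ (pvOrd cs).take k := by
    rw [pvMem_take_iff]
    rintro ⟨j, hj, hjk, he⟩
    have := (List.Nodup.getElem_inj_iff (pvOrd_nodup cs)).mp he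
    omega
  have hmkp : (pvMark cs M ((pvOrd cs).take k))[((pvOrd cs)[k]'hkord).toNat]?
      = some (cs[((pvOrd cs)[k]'hkord).toNat]) := by
    rw [hmkq _ hpnat, if_neg (by rwa [hpcast]), List.getElem?_eq_getElem hpnat]
  have hge : ∀ y ∈ pvMark cs M ((pvOrd cs).take k), pvVal cs ((pvOrd cs)[k]'hkord) ≤ y := by
    intro y hy
    obtain ⟨q, hq, he⟩ := List.getElem_of_mem hy
    have hq' : q < cs.length := by rwa [pvMark_length] at hq
    have hyq : (pvMark cs M ((pvOrd cs).take k))[q]? = some y := by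
      rw [List.getElem?_eq_getElem hq, he]
    rw [hmkq q hq'] at hyq
    by_cases hm : ((q : Int) ∈ (pvOrd cs).take k)
    · rw [if_pos hm] at hyq
      have hyM : y = M := by injection hyq with h; omega
      subst hyM
      exact le_of_lt (hv ▸ hM _ (List.getElem_mem hpnat))
    · rw [if_neg hm, List.getElem?_eq_getElem hq'] at hyq
      have hy' : y = cs[q] := by injection hyq with h; omega
      obtain ⟨j, hj, hkj, hje⟩ := pvUnmarked cs k q hq' hm
      have hvq : pvVal cs (q : Int) = cs[q] :=
        PySem.List.pyGetD_eq_getElem cs 0 (by positivity) (by exact_mod_cast hq')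
      rcases eq_or_lt_of_le hkj with rfl | hlt
      · have : ((pvOrd cs)[k]'hkord) = (q : Int) := hje ▸ rfl
        rw [hy', ← hvq, this]
      · have hlex := pvOrd_getElem_lex cs hlt hj
        rw [hje] at hlex
        rcases hlex with h' | ⟨h', _⟩
        · rw [hy', ← hvq]; exact le_of_lt h'
        · rw [hy', ← hvq]; exact le_of_eq h'
  cases hmn : PySem.List.min? (pvMark cs M ((pvOrd cs).take k)) (fun x => x) with
  | none =>
    rw [PySem.List.min?_eq_none_iff] at hmn
    have := List.mem_of_getElem? hmkp
    simp [hmn] at this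
  | some m =>
    have h1 : m ≤ cs[((pvOrd cs)[k]'hkord).toNat] :=
      PySem.List.min?_isMin hmn _ (List.mem_of_getElem? hmkp)
    have h2 : pvVal cs ((pvOrd cs)[k]'hkord) ≤ m := hge m (PySem.List.min?_mem hmn)
    rw [hv] at h2 ⊢
    exact congrArg some (le_antisymm h1 h2)

lemma pvIdx_eq (cs : List Int) (M : Int) (hM : ∀ x ∈ cs, x < M) (k : Nat)
    (hk : k < cs.length) :
    PySem.List.index? (pvMark cs M ((pvOrd cs).take k))
        (pvVal cs ((pvOrd cs)[k]'(by rw [pvOrd_length]; exact hk)))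
      = some ((pvOrd cs)[k]'(by rw [pvOrd_length]; exact hk)).toNat := by
  have hkord : k < (pvOrd cs).length := by rw [pvOrd_length]; exact hk
  obtain ⟨hp0, hpn⟩ := pvOrd_getElem_range cs hkord
  have hpnat : ((pvOrd cs)[k]'hkord).toNat < cs.length := by omega
  have hpcast : (((pvOrd cs)[k]'hkord).toNat : Int) = (pvOrd cs)[k]'hkord := by omega
  have hv : pvVal cs ((pvOrd cs)[k]'hkord) = cs[((pvOrd cs)[k]'hkord).toNat] :=
    PySem.List.pyGetD_eq_getElem cs 0 hp0 hpn
  have hbound : ∀ r ∈ (pvOrd cs).take k, 0 ≤ r ∧ r < (cs.length : Int) :=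
    fun r hr => (pvOrd_mem cs r).mp (List.mem_of_mem_take hr)
  have hmkq := fun (q : Nat) (hq : q < cs.length) =>
    pvMark_getElem? M ((pvOrd cs).take k) cs hbound q hq
  have hpnm : ((pvOrd cs)[k]'hkord) ∉ (pvOrd cs).take k := by
    rw [pvMem_take_iff]
    rintro ⟨j, hj, hjk, he⟩
    have := (List.Nodup.getElem_inj_iff (pvOrd_nodup cs)).mp he
    omega
  have hmklen : ((pvOrd cs)[k]'hkord).toNat < (pvMark cs M ((pvOrd cs).take k)).length := by
    rw [pvMark_length]; exact hpnat
  rw [PySem.List.index?_eq_idxOf?, List.idxOf?_eq_some_iff]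
  refine ⟨hmklen, ?_, ?_⟩
  · have : (pvMark cs M ((pvOrd cs).take k))[((pvOrd cs)[k]'hkord).toNat]?
        = some (cs[((pvOrd cs)[k]'hkord).toNat]) := by
      rw [hmkq _ hpnat, if_neg (by rwa [hpcast]), List.getElem?_eq_getElem hpnat]
    rw [List.getElem?_eq_getElem hmklen] at this
    rw [hv]
    injection this
  · intro j hj
    have hj' : j < cs.length := by omega
    have hji : (j : Int) < (pvOrd cs)[k]'hkord := by omega
    have hjq : (pvMark cs M ((pvOrd cs).take k))[j]?
        = some ((pvMark cs M ((pvOrd cs).take k))[j]'(by rw [pvMark_length]; exact hj')) :=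
      List.getElem?_eq_getElem _
    rw [hmkq j hj'] at hjq
    by_cases hm : ((j : Int) ∈ (pvOrd cs).take k)
    · rw [if_pos hm] at hjq
      have hM' : pvVal cs ((pvOrd cs)[k]'hkord) < M := hv ▸ hM _ (List.getElem_mem hpnat)
      intro hcon
      rw [hcon] at hjq
      injection hjq with h
      omega
    · rw [if_neg hm, List.getElem?_eq_getElem hj'] at hjq
      obtain ⟨l, hl, hkl, hle⟩ := pvUnmarked cs k j hj' hm
      have hvq : pvVal cs (j : Int) = cs[j] :=
        PySem.List.pyGetD_eq_getElem cs 0 (by positivity) (by exact_mod_cast hj')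
      rcases eq_or_lt_of_le hkl with rfl | hlt
      · exfalso; rw [hle] at hji; omega
      · have hlex := pvOrd_getElem_lex cs hlt hl
        rw [hle] at hlex
        intro hcon
        rw [hcon] at hjq
        injection hjq with h
        rcases hlex with h' | ⟨h', hlt2⟩
        · rw [hvq, h, hv] at h'; exact absurd h' (lt_irrefl _)
        · omega

lemma pvStep_eq (cs : List Int) (M : Int) (hM : ∀ x ∈ cs, x < M) (k : Nat)
    (hk : k < cs.length) :
    pvStepA M (pvMark cs M ((pvOrd cs).take k), pvScat cs.length ((pvOrd cs).take k)) (k : Int)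
      = (pvMark cs M ((pvOrd cs).take (k + 1)), pvScat cs.length ((pvOrd cs).take (k + 1))) := by
  have hkord : k < (pvOrd cs).length := by rw [pvOrd_length]; exact hk
  obtain ⟨hp0, hpn⟩ := pvOrd_getElem_range cs hkord
  have htake : (pvOrd cs).take (k + 1) = (pvOrd cs).take k ++ [(pvOrd cs)[k]'hkord] := by
    rw [List.take_add_one, List.getElem?_eq_getElem hkord]
    rfl
  have hlen : ((pvOrd cs).take k).length = k := by
    rw [List.length_take, pvOrd_length]; omega
  unfold pvStepA
  rw [pvMin_eq cs M hM k hk]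
  simp only [Option.bind_some]
  rw [pvIdx_eq cs M hM k hk]
  simp only [Option.getD_some]
  refine Prod.ext ?_ ?_
  · show (pvMark cs M ((pvOrd cs).take k)).set ((pvOrd cs)[k]'hkord).toNat M
        = pvMark cs M ((pvOrd cs).take (k + 1))
    rw [htake]
    conv_rhs => rw [pvMark, List.foldl_append]
    rfl
  · show (pvScat cs.length ((pvOrd cs).take k)).set ((pvOrd cs)[k]'hkord).toNat (k : Int)
        = pvScat cs.length ((pvOrd cs).take (k + 1))
    rw [htake]
    unfold pvScat
    rw [pvEnumerate_append_singleton, List.foldl_append]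
    simp only [List.foldl_cons, List.foldl_nil]
    rw [PySem.List.pySetD_of_nonneg _ _ hp0, hlen]
    norm_num

-- ---- the loop invariant ----
lemma pvLoop_inv (cs : List Int) (M : Int) (hM : ∀ x ∈ cs, x < M) :
    ∀ k : Nat, k ≤ cs.length →
    (PySem.List.pyRange 0 (k : Int) 1).foldl (pvStepA M) (cs, List.replicate cs.length (-1 : Int))
      = (pvMark cs M ((pvOrd cs).take k), pvScat cs.length ((pvOrd cs).take k)) := by
  intro k
  induction k with
  | zero =>
    intro _
    simp [pvMark, pvScat, PySem.List.enumerate_nil, PySem.List.pyRange_one_eq_nil (le_refl (0 : Int))]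
  | succ k ih =>
    intro hk1
    have hcast : ((k + 1 : Nat) : Int) = (k : Int) + 1 := by push_cast; ring
    rw [hcast, PySem.List.pyRange_one_succ_right (by positivity), List.foldl_append, ih (by omega)]
    simp only [List.foldl_cons, List.foldl_nil]
    exact pvStep_eq cs M hM k (by omega)

-- ===== VERDICT (by name: the statement is the Claim_ definition above) =====
-- the two ports, rewritten to the proof-side vocabulary
lemma pvAlt_eq (key : String) :
    get_key_indexes_py_alt key
      = pvScat (key.toList.map (fun c => (c.toNat : Int))).length
          (pvOrd (key.toList.map (fun c => (c.toNat : Int)))) := rfl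

lemma pvA_eq (key : String) (mx : Int)
    (hmx : PySem.List.max? (key.toList.map (fun c => (c.toNat : Int))) (fun x => x) = some mx) :
    get_key_indexes_py key
      = ((PySem.List.pyRange 0 ((key.toList.map (fun c => (c.toNat : Int))).length : Int) 1).foldl
          (pvStepA (mx + 1))
          (key.toList.map (fun c => (c.toNat : Int)),
           List.replicate (key.toList.map (fun c => (c.toNat : Int))).length (-1 : Int))).2 := by
  simp only [get_key_indexes_py, List.length_replicate, hmx]

theorem get_key_indexes_py_spec : Claim_equal_get_key_indexes_py := by
  intro key _ hpre
  unfold Spec_get_key_indexes_py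
  have hne : key.toList.map (fun c => (c.toNat : Int)) ≠ [] := by
    intro h
    exact hpre (String.toList_eq_nil_iff.mp (List.map_eq_nil_iff.mp h))
  cases hmx : PySem.List.max? (key.toList.map (fun c => (c.toNat : Int))) (fun x => x) with
  | none => exact absurd ((PySem.List.max?_eq_none_iff _ _).mp hmx) hne
  | some mx =>
    have hM : ∀ x ∈ key.toList.map (fun c => (c.toNat : Int)), x < mx + 1 :=
      fun x hx => lt_of_le_of_lt (PySem.List.max?_isMax hmx x hx) (by omega)
    rw [pvA_eq key mx hmx, pvLoop_inv _ _ hM _ le_rfl, pvAlt_eq]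
    rw [← pvOrd_length (key.toList.map (fun c => (c.toNat : Int))), List.take_length]
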